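-- pv_equiv track=rewrite | github.com/sergeylobachev/leetcode | Contests/Weekly Contest 367/3.py | solution
-- ===== SOURCE A (Python) =====
-- def solution(nums, id, vd):
--     N = len(nums)
--
--     max_i = 0
--     min_i = 0
--     for i in range(id, N):
--         if nums[i-id] > nums[max_i]:
--             max_i = i-id
--         if nums[i-id] < nums[min_i]:
--             min_i = i-id
--         if abs(nums[i] - nums[max_i]) >= vd:
--             return [max_i, i]
--         if abs(nums[i] - nums[min_i]) >= vd:
--             return [min_i, i]
--
--     return [-1, -1]
-- ===== SOURCE B (Python) =====
-- def solution(nums, id, vd):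
--     # For each candidate i, recompute the extremes of the whole window nums[:i-id+1]
--     # with the builtins max/min and locate them with list.index (first occurrence =
--     # earliest extremal index, the same tie rule as a strict-compare running scan).
--     for i in range(id, len(nums)):
--         window = nums[:i - id + 1]
--         hi = max(window)
--         if abs(nums[i] - hi) >= vd:
--             return [window.index(hi), i]
--         lo = min(window)
--         if abs(nums[i] - lo) >= vd:
--             return [window.index(lo), i]
--     return [-1, -1]
-- ===== Notes on version B (the rewrite author's own statement) =====
-- stated objective: alternative
-- what changed: A's stateful single scan carrying running argmax/argmin is replaced by a stateless per-candidate recomputation: for each i, B slices the window nums[:i-id+1], takes its extremes with the builtins max/min and locates them with list.index; no loop-carried state, at the price of recomputing the window extremes each step (B is not faster).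
-- outside the precondition, e.g. on solution([1, 2], -1, 5): A raises IndexError, B returns [-1, -1]; on solution([1, 2], -1, 0): A returns [0, -1], B returns [0, -1]
import Mathlib
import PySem

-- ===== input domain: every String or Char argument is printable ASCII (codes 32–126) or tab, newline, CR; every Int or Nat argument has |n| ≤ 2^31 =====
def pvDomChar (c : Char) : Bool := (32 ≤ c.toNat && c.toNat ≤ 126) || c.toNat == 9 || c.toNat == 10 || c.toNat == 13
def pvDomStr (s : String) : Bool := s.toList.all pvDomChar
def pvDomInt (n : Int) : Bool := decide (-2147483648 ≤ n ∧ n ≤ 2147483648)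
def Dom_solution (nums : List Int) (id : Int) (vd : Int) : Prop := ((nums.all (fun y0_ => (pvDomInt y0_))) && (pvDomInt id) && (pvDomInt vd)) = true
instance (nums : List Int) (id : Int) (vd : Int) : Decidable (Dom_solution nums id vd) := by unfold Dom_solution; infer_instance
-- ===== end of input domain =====

-- B drops A's running argmax/argmin state entirely: for each candidate i it recomputes
-- the window's extremes with max/min and locates them with list.index (alternative
-- stateless decomposition, not faster). Equivalence is claimed for id ≥ 0.

-- ===== PORT A =====
-- A's single loop with early return, state (max_i, min_i); indices valid under Pre_.
def solutionLoopA (nums : List Int) (id : Int) (vd : Int)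
    (is : List Int) (maxI minI : Int) : List Int :=
  match is with
  | [] => [-1, -1]
  | i :: rest =>
    let maxI' := if PySem.List.pyGetD nums (i - id) 0 > PySem.List.pyGetD nums maxI 0 then i - id else maxI
    let minI' := if PySem.List.pyGetD nums (i - id) 0 < PySem.List.pyGetD nums minI 0 then i - id else minI
    if |PySem.List.pyGetD nums i 0 - PySem.List.pyGetD nums maxI' 0| ≥ vd then [maxI', i]
    else if |PySem.List.pyGetD nums i 0 - PySem.List.pyGetD nums minI' 0| ≥ vd then [minI', i]
    else solutionLoopA nums id vd rest maxI' minI'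

def solution (nums : List Int) (id : Int) (vd : Int) : List Int :=
  solutionLoopA nums id vd (PySem.List.pyRange id nums.length 1) 0 0

-- ===== PORT B =====
-- B's loop over i: window = nums[:i-id+1]; max/min/.index on the window.
-- The .getD 0 defaults are unreachable under Pre_: the window is nonempty (max?/min?
-- return some) and the located value is a member of the window (index? returns some).
def solLoopB (nums : List Int) (id : Int) (vd : Int) (is : List Int) : List Int :=
  match is with
  | [] => [-1, -1]
  | i :: rest =>
    let window := PySem.List.slice nums none (some (i - id + 1))
    let hi := (PySem.List.max? window (fun y => y)).getD 0
    if |PySem.List.pyGetD nums i 0 - hi| ≥ vd then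
      [(((PySem.List.index? window hi).getD 0 : Nat) : Int), i]
    else
      let lo := (PySem.List.min? window (fun y => y)).getD 0
      if |PySem.List.pyGetD nums i 0 - lo| ≥ vd then
        [(((PySem.List.index? window lo).getD 0 : Nat) : Int), i]
      else solLoopB nums id vd rest

def solution_alt (nums : List Int) (id : Int) (vd : Int) : List Int :=
  solLoopB nums id vd (PySem.List.pyRange id nums.length 1)

-- ===== PRECONDITION & SPEC =====
-- Pre_ excludes negative id: outside the problem's natural domain (id is an index distance);
-- there A raises IndexError on nums[i-id] whenever the scan reaches an index ≥ len(nums),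
-- and any value it does return rests on Python negative-index wraparound.
def Pre_solution (nums : List Int) (id : Int) (vd : Int) : Prop := 0 ≤ id
instance (nums : List Int) (id : Int) (vd : Int) : Decidable (Pre_solution nums id vd) := by
  unfold Pre_solution; infer_instance
def pvWitness_solution : List Int × Int × Int := ([1, 5, 2], 1, 3)

def Spec_solution (nums : List Int) (id : Int) (vd : Int) (out : List Int) : Prop :=
  out = solution_alt nums id vd
instance (nums : List Int) (id : Int) (vd : Int) (out : List Int) : Decidable (Spec_solution nums id vd out) := by
  unfold Spec_solution; infer_instance

-- ===== CLAIM (what is proved, stated in full; the proofs are below) =====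
def Claim_equal_solution : Prop := ∀ (nums : List Int) (id : Int) (vd : Int),
  Dom_solution nums id vd → Pre_solution nums id vd → Spec_solution nums id vd (solution nums id vd)

-- ===== LEMMAS AND PROOFS =====

-- running earliest argmax/argmin of nums[0..k] by strict comparison (what A maintains)
def amaxN (nums : List Int) : Nat → Nat
  | 0 => 0
  | k + 1 => if nums.getD (k + 1) 0 > nums.getD (amaxN nums k) 0 then k + 1 else amaxN nums k
def aminN (nums : List Int) : Nat → Nat
  | 0 => 0
  | k + 1 => if nums.getD (k + 1) 0 < nums.getD (aminN nums k) 0 then k + 1 else aminN nums k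

-- pre-update state entering step k of A's loop
def pamaxN (nums : List Int) : Nat → Nat
  | 0 => 0
  | k + 1 => amaxN nums k
def paminN (nums : List Int) : Nat → Nat
  | 0 => 0
  | k + 1 => aminN nums k

lemma amaxN_eq_step (nums : List Int) (k : Nat) :
    amaxN nums k = if nums.getD k 0 > nums.getD (pamaxN nums k) 0 then k else pamaxN nums k := by
  cases k <;> simp [amaxN, pamaxN]
lemma aminN_eq_step (nums : List Int) (k : Nat) :
    aminN nums k = if nums.getD k 0 < nums.getD (paminN nums k) 0 then k else paminN nums k := by
  cases k <;> simp [aminN, paminN]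

-- the value max(nums[:k+1]) as Python's max computes it (foldl over the window)
def wMax (nums : List Int) (k : Nat) : Int :=
  match nums.take (k + 1) with
  | [] => 0
  | x :: t => t.foldl max x
def wMin (nums : List Int) (k : Nat) : Int :=
  match nums.take (k + 1) with
  | [] => 0
  | x :: t => t.foldl min x

lemma wMax_succ (nums : List Int) (k : Nat) (h : k + 1 < nums.length) :
    wMax nums (k + 1) = max (wMax nums k) (nums.getD (k + 1) 0) := by
  have htk : nums.take (k + 2) = nums.take (k + 1) ++ [nums.getD (k + 1) 0] := by
    rw [List.take_succ]
    congr 1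
    rw [List.getElem?_eq_getElem h, List.getD_eq_getElem _ _ h]
    rfl
  unfold wMax
  rw [htk]
  have hne : nums.take (k + 1) ≠ [] := by
    have hl : (nums.take (k + 1)).length = k + 1 := by rw [List.length_take]; omega
    intro he
    rw [he] at hl
    simp at hl
  cases hx : nums.take (k + 1) with
  | nil => exact absurd hx hne
  | cons x t => simp [List.foldl_append]

lemma wMin_succ (nums : List Int) (k : Nat) (h : k + 1 < nums.length) :
    wMin nums (k + 1) = min (wMin nums k) (nums.getD (k + 1) 0) := by
  have htk : nums.take (k + 2) = nums.take (k + 1) ++ [nums.getD (k + 1) 0] := by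
    rw [List.take_succ]
    congr 1
    rw [List.getElem?_eq_getElem h, List.getD_eq_getElem _ _ h]
    rfl
  unfold wMin
  rw [htk]
  have hne : nums.take (k + 1) ≠ [] := by
    have hl : (nums.take (k + 1)).length = k + 1 := by rw [List.length_take]; omega
    intro he
    rw [he] at hl
    simp at hl
  cases hx : nums.take (k + 1) with
  | nil => exact absurd hx hne
  | cons x t => simp [List.foldl_append]

-- invariant: amaxN is an index ≤ k carrying the window max, every earlier element strictly smaller
lemma maxInv (nums : List Int) (k : Nat) (hk : k < nums.length) :
    amaxN nums k ≤ k ∧ wMax nums k = nums.getD (amaxN nums k) 0 ∧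
    (∀ j ≤ k, nums.getD j 0 ≤ wMax nums k) ∧
    (∀ j < amaxN nums k, nums.getD j 0 < nums.getD (amaxN nums k) 0) := by
  induction k with
  | zero =>
    refine ⟨le_refl 0, ?_, ?_, by simp [amaxN]⟩
    · cases nums with
      | nil => simp at hk
      | cons a t => simp [wMax, amaxN]
    · intro j hj
      interval_cases j
      cases nums with
      | nil => simp at hk
      | cons a t => simp [wMax]
  | succ m ih =>
    obtain ⟨h1, h2, h3, h4⟩ := ih (by omega)
    have hs := wMax_succ nums m hk
    by_cases hc : nums.getD (m + 1) 0 > nums.getD (amaxN nums m) 0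
    · have ha : amaxN nums (m + 1) = m + 1 := by
        rw [show amaxN nums (m + 1) = if nums.getD (m + 1) 0 > nums.getD (amaxN nums m) 0 then m + 1 else amaxN nums m from rfl, if_pos hc]
      refine ⟨by omega, ?_, ?_, ?_⟩
      · rw [hs, ha]; omega
      · intro j hj
        rw [hs]
        rcases Nat.lt_or_ge j (m + 1) with hj' | hj'
        · have := h3 j (by omega); omega
        · have : j = m + 1 := by omega
          subst this; omega
      · intro j hj
        rw [ha] at hj ⊢
        have := h3 j (by omega)
        rw [h2] at this
        omega
    · have ha : amaxN nums (m + 1) = amaxN nums m := by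
        rw [show amaxN nums (m + 1) = if nums.getD (m + 1) 0 > nums.getD (amaxN nums m) 0 then m + 1 else amaxN nums m from rfl, if_neg hc]
      refine ⟨by omega, ?_, ?_, ?_⟩
      · rw [hs, ha, ← h2]; rw [← h2] at hc; omega
      · intro j hj
        rw [hs]
        rcases Nat.lt_or_ge j (m + 1) with hj' | hj'
        · have := h3 j (by omega); omega
        · have : j = m + 1 := by omega
          subst this; omega
      · intro j hj
        rw [ha] at hj ⊢
        exact h4 j hj
lemma minInv (nums : List Int) (k : Nat) (hk : k < nums.length) :
    aminN nums k ≤ k ∧ wMin nums k = nums.getD (aminN nums k) 0 ∧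
    (∀ j ≤ k, wMin nums k ≤ nums.getD j 0) ∧
    (∀ j < aminN nums k, nums.getD (aminN nums k) 0 < nums.getD j 0) := by
  induction k with
  | zero =>
    refine ⟨le_refl 0, ?_, ?_, by simp [aminN]⟩
    · cases nums with
      | nil => simp at hk
      | cons a t => simp [wMin, aminN]
    · intro j hj
      interval_cases j
      cases nums with
      | nil => simp at hk
      | cons a t => simp [wMin]
  | succ m ih =>
    obtain ⟨h1, h2, h3, h4⟩ := ih (by omega)
    have hs := wMin_succ nums m hk
    by_cases hc : nums.getD (m + 1) 0 < nums.getD (aminN nums m) 0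
    · have ha : aminN nums (m + 1) = m + 1 := by
        rw [show aminN nums (m + 1) = if nums.getD (m + 1) 0 < nums.getD (aminN nums m) 0 then m + 1 else aminN nums m from rfl, if_pos hc]
      refine ⟨by omega, ?_, ?_, ?_⟩
      · rw [hs, ha]; omega
      · intro j hj
        rw [hs]
        rcases Nat.lt_or_ge j (m + 1) with hj' | hj'
        · have := h3 j (by omega); omega
        · have : j = m + 1 := by omega
          subst this; omega
      · intro j hj
        rw [ha] at hj ⊢
        have := h3 j (by omega)
        rw [h2] at this
        omega
    · have ha : aminN nums (m + 1) = aminN nums m := by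
        rw [show aminN nums (m + 1) = if nums.getD (m + 1) 0 < nums.getD (aminN nums m) 0 then m + 1 else aminN nums m from rfl, if_neg hc]
      refine ⟨by omega, ?_, ?_, ?_⟩
      · rw [hs, ha, ← h2]; rw [← h2] at hc; omega
      · intro j hj
        rw [hs]
        rcases Nat.lt_or_ge j (m + 1) with hj' | hj'
        · have := h3 j (by omega); omega
        · have : j = m + 1 := by omega
          subst this; omega
      · intro j hj
        rw [ha] at hj ⊢
        exact h4 j hj

-- max(window) / min(window) is exactly the value at A's running argmax / argmin
lemma max?_window (nums : List Int) (k : Nat) (hk : k < nums.length) :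
    (PySem.List.max? (nums.take (k + 1)) (fun y => y)).getD 0 = wMax nums k := by
  have hne : nums.take (k + 1) ≠ [] := by
    have hl : (nums.take (k + 1)).length = k + 1 := by rw [List.length_take]; omega
    intro he
    rw [he] at hl
    simp at hl
  cases hx : nums.take (k + 1) with
  | nil => exact absurd hx hne
  | cons x t =>
    rw [PySem.List.max?_id_cons]
    unfold wMax
    rw [hx]
    rfl
lemma min?_window (nums : List Int) (k : Nat) (hk : k < nums.length) :
    (PySem.List.min? (nums.take (k + 1)) (fun y => y)).getD 0 = wMin nums k := by
  have hne : nums.take (k + 1) ≠ [] := by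
    have hl : (nums.take (k + 1)).length = k + 1 := by rw [List.length_take]; omega
    intro he
    rw [he] at hl
    simp at hl
  cases hx : nums.take (k + 1) with
  | nil => exact absurd hx hne
  | cons x t =>
    rw [PySem.List.min?_id_cons]
    unfold wMin
    rw [hx]
    rfl

-- .index of that value in the window is A's running argmax / argmin itself
lemma index_first (nums : List Int) (k m : Nat) (hk : k < nums.length) (hm : m ≤ k)
    (hlt : ∀ j < m, nums.getD j 0 ≠ nums.getD m 0) :
    PySem.List.index? (nums.take (k + 1)) (nums.getD m 0) = some m := by
  set xs := nums.take (k + 1) with hxs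
  have hlen : xs.length = k + 1 := by
    rw [hxs, List.length_take]; omega
  have hmlt : m < xs.length := by omega
  have hget : ∀ j, j < k + 1 → xs[j]? = some (nums.getD j 0) := by
    intro j hj
    rw [hxs, List.getElem?_take_of_lt hj,
      List.getElem?_eq_getElem (by omega), List.getD_eq_getElem _ _ (by omega)]
  rw [PySem.List.index?_eq_some_iff]
  refine ⟨xs.take m, xs.drop (m + 1), ?_, ?_, ?_⟩
  · conv_lhs => rw [← List.take_append_drop m xs]
    congr 1
    have hm' : xs[m] = nums.getD m 0 := by
      have := hget m (by omega)
      rw [List.getElem?_eq_getElem hmlt] at this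
      exact Option.some.inj this
    rw [List.drop_eq_getElem_cons hmlt, hm']
  · rw [List.length_take]; omega
  · intro hmem
    rw [hxs, List.take_take, min_eq_left (by omega)] at hmem
    obtain ⟨j, hje⟩ := List.mem_iff_getElem?.mp hmem
    have hjm : j < m := by
      by_contra hge
      rw [List.getElem?_eq_none (by rw [List.length_take]; omega)] at hje
      simp at hje
    rw [List.getElem?_take_of_lt hjm, List.getElem?_eq_getElem (by omega)] at hje
    refine hlt j hjm ?_
    rw [List.getD_eq_getElem _ _ (by omega)]
    exact Option.some.inj hje

-- the two loops agree step for step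
lemma scan_eq (nums : List Int) (id vd : Int) (hid : 0 ≤ id) :
    ∀ (n k : Nat), (nums.length : Int) - (id + k) ≤ n →
      solutionLoopA nums id vd (PySem.List.pyRange (id + k) nums.length 1)
          ((pamaxN nums k : Nat) : Int) ((paminN nums k : Nat) : Int)
        = solLoopB nums id vd (PySem.List.pyRange (id + k) nums.length 1) := by
  intro n
  induction n with
  | zero =>
    intro k hk
    rw [PySem.List.pyRange_one_eq_nil (by omega)]
    simp [solutionLoopA, solLoopB]
  | succ m ih =>
    intro k hk
    by_cases hlt : (id + (k : Int)) < nums.length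
    · rw [PySem.List.pyRange_one_cons hlt]
      have hkN : k < nums.length := by omega
      have hsub : (id + (k : Int)) - id = (k : Int) := by ring
      obtain ⟨hma, hmb, hmc, hmd⟩ := maxInv nums k hkN
      obtain ⟨hna, hnb, hnc, hnd⟩ := minInv nums k hkN
      have hwin : PySem.List.slice nums none (some ((id + (k : Int)) - id + 1)) = nums.take (k + 1) := by
        rw [hsub, show ((k : Int) + 1) = ((k + 1 : Nat) : Int) by push_cast; ring,
          PySem.List.slice_to_natCast]
      have hMI : (if PySem.List.pyGetD nums ((id + (k : Int)) - id) 0 > PySem.List.pyGetD nums ((pamaxN nums k : Nat) : Int) 0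
          then (id + (k : Int)) - id else ((pamaxN nums k : Nat) : Int)) = ((amaxN nums k : Nat) : Int) := by
        rw [hsub, PySem.List.pyGetD_natCast, PySem.List.pyGetD_natCast, amaxN_eq_step]
        split_ifs <;> simp
      have hNI : (if PySem.List.pyGetD nums ((id + (k : Int)) - id) 0 < PySem.List.pyGetD nums ((paminN nums k : Nat) : Int) 0
          then (id + (k : Int)) - id else ((paminN nums k : Nat) : Int)) = ((aminN nums k : Nat) : Int) := by
        rw [hsub, PySem.List.pyGetD_natCast, PySem.List.pyGetD_natCast, aminN_eq_step]
        split_ifs <;> simp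
      have hhi : (PySem.List.max? (PySem.List.slice nums none (some ((id + (k : Int)) - id + 1))) (fun y => y)).getD 0
          = PySem.List.pyGetD nums ((amaxN nums k : Nat) : Int) 0 := by
        rw [hwin, max?_window nums k hkN, hmb, PySem.List.pyGetD_natCast]
      have hlo : (PySem.List.min? (PySem.List.slice nums none (some ((id + (k : Int)) - id + 1))) (fun y => y)).getD 0
          = PySem.List.pyGetD nums ((aminN nums k : Nat) : Int) 0 := by
        rw [hwin, min?_window nums k hkN, hnb, PySem.List.pyGetD_natCast]
      have hidxM : PySem.List.index? (PySem.List.slice nums none (some ((id + (k : Int)) - id + 1)))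
          (PySem.List.pyGetD nums ((amaxN nums k : Nat) : Int) 0) = some (amaxN nums k) := by
        rw [hwin, PySem.List.pyGetD_natCast]
        exact index_first nums k (amaxN nums k) hkN hma (fun j hj => by have := hmd j hj; omega)
      have hidxN : PySem.List.index? (PySem.List.slice nums none (some ((id + (k : Int)) - id + 1)))
          (PySem.List.pyGetD nums ((aminN nums k : Nat) : Int) 0) = some (aminN nums k) := by
        rw [hwin, PySem.List.pyGetD_natCast]
        exact index_first nums k (aminN nums k) hkN hna (fun j hj => by have := hnd j hj; omega)
      show solutionLoopA _ _ _ _ _ _ = solLoopB _ _ _ _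
      simp only [solutionLoopA, solLoopB, hMI, hNI, hhi, hlo, hidxM, hidxN, Option.getD_some]
      split_ifs with h1 h2
      · rfl
      · rfl
      · have hnext : (id + (k : Int)) + 1 = id + ((k + 1 : Nat) : Int) := by push_cast; ring
        rw [hnext]
        have e1 : pamaxN nums (k + 1) = amaxN nums k := rfl
        have e2 : paminN nums (k + 1) = aminN nums k := rfl
        rw [← e1, ← e2]
        exact ih (k + 1) (by push_cast; omega)
    · rw [PySem.List.pyRange_one_eq_nil (by omega)]
      simp [solutionLoopA, solLoopB]

-- ===== VERDICT (by name: the statement is the Claim_ definition above) =====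
theorem solution_spec : Claim_equal_solution := by
  intro nums id vd _ hpre
  unfold Spec_solution solution solution_alt
  have h := scan_eq nums id vd hpre ((nums.length : Int) - id).toNat 0 (by push_cast; omega)
  simpa [pamaxN, paminN] using h
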